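-- pv_equiv track=rewrite | github.com/RefundGarbage/Rebinding_Analysis_Scripts | COL_BD_Lifetime_Only/track-sorting.py | track_splitting_filtered
-- ===== SOURCE A (Python) =====
-- def track_splitting_filtered(track, gap_max, len_min):
--     res = []
--     count_split = 0
--     count_filter = 0
--     record = []
--
--     # Split
--     for i in range(len(track) - 1):
--         record.append(track[i])
--         if track[i+1][0] - track[i][0] > gap_max:
--             res.append(record.copy())
--             count_split += 1
--             record = []
--     record.append(track[len(track) - 1])
--     res.append(record.copy())
--
--     # Filter
--     i = 0
--     while i < len(res):
--         if(len(res[i]) < len_min):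
--             del res[i]
--             count_filter += 1
--         else:
--             i += 1
--
--     return res, count_split, count_filter
-- ===== SOURCE B (Python) =====
-- def track_splitting_filtered(track, gap_max, len_min):
--     # boundary-slicing decomposition: find gap positions once, then slice
--     bounds = [i + 1 for i, (a, b) in enumerate(zip(track, track[1:])) if b[0] - a[0] > gap_max]
--     cuts = [0] + bounds + [len(track)]
--     segments = [track[a:b] for a, b in zip(cuts, cuts[1:])]
--     kept = [s for s in segments if len(s) >= len_min]
--     return kept, len(bounds), len(segments) - len(kept)
-- ===== Notes on version B (the rewrite author's own statement) =====
-- stated objective: alternative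
-- what changed: B first collects all gap boundary indices in one comprehension, then builds segments by slicing the track between consecutive cuts and filters them with a comprehension, instead of A's element-by-element record buffer and in-place deletion loop.
import Mathlib
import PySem

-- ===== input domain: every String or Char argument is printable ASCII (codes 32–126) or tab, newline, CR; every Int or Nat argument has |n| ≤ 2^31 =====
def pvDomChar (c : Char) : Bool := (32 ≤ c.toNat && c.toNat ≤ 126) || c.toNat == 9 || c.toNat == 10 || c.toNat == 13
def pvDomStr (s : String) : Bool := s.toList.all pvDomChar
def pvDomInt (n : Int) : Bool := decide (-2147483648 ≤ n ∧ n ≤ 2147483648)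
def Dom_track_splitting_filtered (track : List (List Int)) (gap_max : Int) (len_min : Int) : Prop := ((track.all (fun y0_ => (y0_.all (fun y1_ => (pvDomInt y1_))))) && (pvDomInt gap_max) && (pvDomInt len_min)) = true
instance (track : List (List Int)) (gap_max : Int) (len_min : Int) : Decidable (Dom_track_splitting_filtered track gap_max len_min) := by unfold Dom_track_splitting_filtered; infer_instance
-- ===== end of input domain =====

-- B replaces A's element-by-element record buffer and in-place deletion loop by a
-- one-pass boundary-index collection followed by slicing between consecutive cuts
-- and a filtering comprehension (objective: alternative decomposition, same result).

-- ===== PORT A =====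
-- loop body of 'for i in range(len(track) - 1)': state (res, count_split, record)
def pvBodyA (track : List (List Int)) (gap_max : Int)
    (st : List (List (List Int)) × Int × List (List Int)) (i : Int) :
    List (List (List Int)) × Int × List (List Int) :=
  let record := st.2.2 ++ [PySem.List.pyGetD track i []]
  if PySem.List.pyGetD (PySem.List.pyGetD track (i + 1) []) 0 0
       - PySem.List.pyGetD (PySem.List.pyGetD track i []) 0 0 > gap_max then
    (st.1 ++ [record], st.2.1 + 1, [])
  else
    (st.1, st.2.1, record)

-- the 'while i < len(res): … del res[i] …' loop: scan that either deletes the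
-- current element (index stays, counter bumps) or moves past it
def pvFilterA (len_min : Int) : List (List (List Int)) → Int → List (List (List Int)) × Int
  | [], cf => ([], cf)
  | s :: rest, cf =>
    if (s.length : Int) < len_min then pvFilterA len_min rest (cf + 1)
    else
      let p := pvFilterA len_min rest cf
      (s :: p.1, p.2)

def track_splitting_filtered (track : List (List Int)) (gap_max : Int) (len_min : Int) : List (List (List Int)) × Int × Int :=
  let n : Int := track.length
  let st := (PySem.List.pyRange 0 (n - 1) 1).foldl (pvBodyA track gap_max) ([], 0, [])
  let record := st.2.2 ++ [PySem.List.pyGetD track (n - 1) []]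
  let p := pvFilterA len_min (st.1 ++ [record]) 0
  (p.1, st.2.1, p.2)

-- ===== PORT B =====
-- the gap test 'b[0] - a[0] > gap_max' on one zipped pair (a, b)
def pvGapB (gap_max : Int) (q : List Int × List Int) : Bool :=
  decide (PySem.List.pyGetD q.2 0 0 - PySem.List.pyGetD q.1 0 0 > gap_max)

-- bounds = [i + 1 for i, (a, b) in enumerate(zip(track, track[1:])) if b[0] - a[0] > gap_max]
def pvBounds (track : List (List Int)) (gap_max : Int) : List Int :=
  ((PySem.List.enumerate (track.zip (PySem.List.slice track (some 1) none)) 0).filter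
    (fun p => pvGapB gap_max p.2)).map (fun p => p.1 + 1)

-- cuts = [0] + bounds + [len(track)]
def pvCuts (track : List (List Int)) (gap_max : Int) : List Int :=
  0 :: (pvBounds track gap_max ++ [(track.length : Int)])

-- segments = [track[a:b] for a, b in zip(cuts, cuts[1:])]
def pvSegs (track : List (List Int)) (gap_max : Int) : List (List (List Int)) :=
  ((pvCuts track gap_max).zip (pvCuts track gap_max).tail).map
    (fun p => PySem.List.slice track (some p.1) (some p.2))

def track_splitting_filtered_alt (track : List (List Int)) (gap_max : Int) (len_min : Int) : List (List (List Int)) × Int × Int :=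
  let segments := pvSegs track gap_max
  -- kept = [s for s in segments if len(s) >= len_min]
  let kept := segments.filter (fun s => decide (len_min ≤ (s.length : Int)))
  (kept, ((pvBounds track gap_max).length : Int), ((segments.length : Int) - (kept.length : Int)))

-- ===== PRECONDITION & SPEC =====
-- Pre_ excludes exactly the inputs where the Python A raises IndexError: the empty
-- track (A indexes track[len(track)-1]) and, when len(track) ≥ 2, a track containing
-- an empty point (A indexes track[i][0] for every i).
def Pre_track_splitting_filtered (track : List (List Int)) (gap_max : Int) (len_min : Int) : Prop :=
  track ≠ [] ∧ (2 ≤ track.length → ∀ l ∈ track, l ≠ [])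
instance (track : List (List Int)) (gap_max : Int) (len_min : Int) : Decidable (Pre_track_splitting_filtered track gap_max len_min) := by unfold Pre_track_splitting_filtered; infer_instance

def pvWitness_track_splitting_filtered : List (List Int) × Int × Int := ([[0], [1], [5]], 2, 1)

def Spec_track_splitting_filtered (track : List (List Int)) (gap_max : Int) (len_min : Int) (out : List (List (List Int)) × Int × Int) : Prop := out = track_splitting_filtered_alt track gap_max len_min
instance (track : List (List Int)) (gap_max : Int) (len_min : Int) (out : List (List (List Int)) × Int × Int) : Decidable (Spec_track_splitting_filtered track gap_max len_min out) := by unfold Spec_track_splitting_filtered; infer_instance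

-- ===== CLAIM (what is proved, stated in full; the proofs are below) =====
def Claim_equal_track_splitting_filtered : Prop := ∀ (track : List (List Int)) (gap_max : Int) (len_min : Int), Dom_track_splitting_filtered track gap_max len_min → Pre_track_splitting_filtered track gap_max len_min → Spec_track_splitting_filtered track gap_max len_min (track_splitting_filtered track gap_max len_min)


-- ===== LEMMAS AND PROOFS =====

-- the segment structure both programs compute: cut the track after every gap
def pvSplit (gap_max : Int) : List (List Int) → List (List (List Int))
  | [] => []
  | [x] => [[x]]
  | x :: y :: t =>
    let s := pvSplit gap_max (y :: t)
    if PySem.List.pyGetD y 0 0 - PySem.List.pyGetD x 0 0 > gap_max then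
      [x] :: s
    else
      (x :: s.headI) :: s.tail

theorem pvSplit_ne_nil (gap_max : Int) (track : List (List Int)) (h : track ≠ []) :
    pvSplit gap_max track ≠ [] := by
  match track with
  | [x] => simp [pvSplit]
  | x :: y :: t =>
    simp only [pvSplit]
    split_ifs <;> simp

theorem pyGetD_shift {α : Type} (x : α) (l : List α) (i : Int) (h0 : 0 ≤ i) (d : α) :
    PySem.List.pyGetD (x :: l) (i + 1) d = PySem.List.pyGetD l i d := by
  obtain ⟨k, rfl⟩ := Int.eq_ofNat_of_zero_le h0
  have h : ((k : Int) + 1) = ((k + 1 : Nat) : Int) := by push_cast; ring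
  rw [h, PySem.List.pyGetD_natCast, PySem.List.pyGetD_natCast]
  simp

theorem pvSlice_succ_succ {α : Type} (x : α) (l : List α) (a b : Int) (ha : 0 ≤ a) (hb : 0 ≤ b) :
    PySem.List.slice (x :: l) (some (a + 1)) (some (b + 1)) = PySem.List.slice l (some a) (some b) := by
  rw [PySem.List.slice_toNat _ (by omega) (by omega), PySem.List.slice_toNat _ ha hb]
  have h1 : (a + 1).toNat = a.toNat + 1 := by omega
  have h2 : (b + 1).toNat = b.toNat + 1 := by omega
  rw [h1, h2]
  simp [Nat.succ_sub_succ]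

theorem pvSlice_zero_succ {α : Type} (x : α) (l : List α) (b : Int) (hb : 0 ≤ b) :
    PySem.List.slice (x :: l) (some 0) (some (b + 1)) = x :: PySem.List.slice l (some 0) (some b) := by
  rw [PySem.List.slice_toNat _ le_rfl (by omega), PySem.List.slice_toNat _ le_rfl hb]
  have h2 : (b + 1).toNat = b.toNat + 1 := by omega
  simp [h2]

theorem pvFoldl_pyRange_shift {σ : Type} (f : σ → Int → σ) (b : Int) (init : σ) :
    (PySem.List.pyRange 1 (b + 1) 1).foldl f init
      = (PySem.List.pyRange 0 b 1).foldl (fun s i => f s (i + 1)) init := by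
  rw [PySem.List.pyRange_one 1 (b + 1), PySem.List.pyRange_one 0 b]
  rw [List.foldl_map, List.foldl_map]
  have h : (b + 1 - 1).toNat = (b - 0).toNat := by omega
  rw [h]
  refine PySem.List.foldl_congr_mem _ _ _ _ ?_
  intro acc k _
  congr 1
  ring

theorem pvFoldA_spec (gm : Int) : ∀ (track : List (List Int)), track ≠ [] →
    ∀ (res : List (List (List Int))) (cs : Int) (record : List (List Int)),
    (((PySem.List.pyRange 0 ((track.length : Int) - 1) 1).foldl (pvBodyA track gm) (res, cs, record)).1
        ++ [((PySem.List.pyRange 0 ((track.length : Int) - 1) 1).foldl (pvBodyA track gm) (res, cs, record)).2.2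
            ++ [PySem.List.pyGetD track ((track.length : Int) - 1) []]],
      ((PySem.List.pyRange 0 ((track.length : Int) - 1) 1).foldl (pvBodyA track gm) (res, cs, record)).2.1)
    = (res ++ ((record ++ (pvSplit gm track).headI) :: (pvSplit gm track).tail),
       cs + ((pvSplit gm track).length : Int) - 1) := by
  intro track
  induction track with
  | nil => intro h; exact absurd rfl h
  | cons x rest ih =>
    intro _ res cs record
    cases rest with
    | nil =>
      have h0 : (((x :: ([] : List (List Int))).length : Int) - 1) = 0 := by simp
      rw [h0, PySem.List.pyRange_one_eq_nil le_rfl]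
      simp [pvSplit, PySem.List.pyGetD_zero_cons]
    | cons y t =>
      have hlen : (((x :: y :: t).length : Int) - 1) = (t.length : Int) + 1 := by
        push_cast [List.length_cons]; ring
      rw [hlen]
      rw [PySem.List.pyRange_one_cons (by omega), List.foldl_cons]
      rw [show (0 : Int) + 1 = 1 by norm_num]
      rw [pvFoldl_pyRange_shift]
      rw [PySem.List.foldl_congr_mem _ _ (pvBodyA (y :: t) gm) _ ?hcong]
      case hcong =>
        intro acc i hi
        have h0 : 0 ≤ i := (PySem.List.mem_pyRange_one.mp hi).1
        unfold pvBodyA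
        rw [pyGetD_shift x (y :: t) (i + 1) (by omega), pyGetD_shift x (y :: t) i h0]
      have hx0 : PySem.List.pyGetD (x :: y :: t) 0 ([] : List Int) = x := PySem.List.pyGetD_zero_cons _ _ _
      have hx1 : PySem.List.pyGetD (x :: y :: t) (0 + 1) ([] : List Int) = y := by
        rw [pyGetD_shift x (y :: t) 0 le_rfl]
        exact PySem.List.pyGetD_zero_cons _ _ _
      have hxl : PySem.List.pyGetD (x :: y :: t) ((t.length : Int) + 1) ([] : List Int)
          = PySem.List.pyGetD (y :: t) (t.length : Int) ([] : List Int) :=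
        pyGetD_shift x (y :: t) (t.length : Int) (by omega) []
      have hlen2 : (((y :: t).length : Int) - 1) = (t.length : Int) := by
        push_cast [List.length_cons]; ring
      rw [hxl]
      obtain ⟨a, l, hs⟩ := List.exists_cons_of_ne_nil (pvSplit_ne_nil gm (y :: t) (by simp))
      by_cases hg : PySem.List.pyGetD y 0 0 - PySem.List.pyGetD x 0 0 > gm
      · have hbody : pvBodyA (x :: y :: t) gm (res, cs, record) 0 = (res ++ [record ++ [x]], cs + 1, []) := by
          unfold pvBodyA
          rw [hx0, hx1, if_pos hg]
        rw [hbody]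
        have ih' := ih (by simp) (res ++ [record ++ [x]]) (cs + 1) []
        rw [hlen2, hs] at ih'
        rw [ih']
        rw [show pvSplit gm (x :: y :: t) = [x] :: a :: l from by simp [pvSplit, hg, hs]]
        simp [List.append_assoc]
        omega
      · have hbody : pvBodyA (x :: y :: t) gm (res, cs, record) 0 = (res, cs, record ++ [x]) := by
          unfold pvBodyA
          rw [hx0, hx1, if_neg hg]
        rw [hbody]
        have ih' := ih (by simp) res cs (record ++ [x])
        rw [hlen2, hs] at ih'
        rw [ih']
        rw [show pvSplit gm (x :: y :: t) = (x :: a) :: l from by simp [pvSplit, hg, hs]]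
        simp [List.append_assoc]

theorem pvEnumShift {α : Type} (cond : α → Bool) (l : List α) : ∀ (s : Int),
    ((PySem.List.enumerate l (s + 1)).filter (fun p => cond p.2)).map (fun p => p.1 + 1)
      = (((PySem.List.enumerate l s).filter (fun p => cond p.2)).map (fun p => p.1 + 1)).map
          (fun c => c + 1) := by
  induction l with
  | nil => intro s; simp [PySem.List.enumerate]
  | cons a l ih =>
    intro s
    rw [PySem.List.enumerate_cons, PySem.List.enumerate_cons]
    by_cases h : cond a = true
    · simp only [List.filter_cons, h, if_pos]
      simp only [List.map_cons]
      rw [ih (s + 1)]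
    · simp only [List.filter_cons, h]
      simp only [Bool.false_eq_true, ite_false]
      rw [ih (s + 1)]

theorem pvBounds_cons (gm : Int) (x y : List Int) (t : List (List Int)) :
    pvBounds (x :: y :: t) gm
      = (if PySem.List.pyGetD y 0 0 - PySem.List.pyGetD x 0 0 > gm then [(1 : Int)] else [])
        ++ (pvBounds (y :: t) gm).map (fun c => c + 1) := by
  unfold pvBounds
  rw [PySem.List.slice_from_one, PySem.List.slice_from_one]
  simp only [List.tail_cons, List.zip_cons_cons, PySem.List.enumerate_cons, List.filter_cons]
  have hshift := pvEnumShift (fun q => pvGapB gm q) ((y :: t).zip t) 0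
  norm_num at hshift
  by_cases hg : PySem.List.pyGetD y 0 0 - PySem.List.pyGetD x 0 0 > gm
  · have hga : pvGapB gm (x, y) = true := by simpa [pvGapB] using hg
    rw [if_pos hg]
    simp [hga, hshift]
  · have hga : pvGapB gm (x, y) = false := by simpa [pvGapB] using hg
    rw [if_neg hg]
    simp [hga, hshift]

theorem pvBounds_pos (track : List (List Int)) (gm : Int) :
    ∀ c ∈ pvBounds track gm, 1 ≤ c := by
  intro c hc
  unfold pvBounds at hc
  simp only [List.mem_map, List.mem_filter] at hc
  obtain ⟨p, ⟨hp, -⟩, rfl⟩ := hc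
  obtain ⟨k, -, rfl⟩ := (PySem.List.mem_enumerate_iff _ _ _).mp hp
  simp

theorem pvZipMap (c d : List Int) :
    (c.map (fun v => v + 1)).zip (d.map (fun v => v + 1))
      = (c.zip d).map (fun p => (p.1 + 1, p.2 + 1)) := by
  rw [List.zip_map]
  refine List.map_congr_left ?_
  intro p _
  cases p
  rfl

theorem pvSegs_eq (gm : Int) : ∀ (track : List (List Int)), track ≠ [] →
    pvSegs track gm = pvSplit gm track := by
  intro track
  induction track with
  | nil => intro h; exact absurd rfl h
  | cons x rest ih =>
    intro _
    cases rest with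
    | nil =>
      have h1 : pvSegs [x] gm = [PySem.List.slice ([x] : List (List Int)) (some 0) (some 1)] := by
        unfold pvSegs pvCuts pvBounds
        rw [PySem.List.slice_from_one]
        simp
      rw [h1, PySem.List.slice_toNat _ le_rfl (by omega)]
      simp [pvSplit]
    | cons y t =>
      have hEpos : ∀ v ∈ pvBounds (y :: t) gm ++ [((y :: t).length : Int)], 0 ≤ v := by
        intro v hv
        rcases List.mem_append.mp hv with h | h
        · exact le_trans (by omega) (pvBounds_pos _ _ _ h)
        · simp only [List.mem_singleton] at h
          subst h
          omega
      have hIH := ih (by simp)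
      unfold pvSegs pvCuts at hIH ⊢
      rw [List.tail_cons] at hIH
      rw [List.tail_cons]
      rw [pvBounds_cons]
      obtain ⟨a, l, hs⟩ := List.exists_cons_of_ne_nil (pvSplit_ne_nil gm (y :: t) (by simp))
      by_cases hg : PySem.List.pyGetD y 0 0 - PySem.List.pyGetD x 0 0 > gm
      · rw [if_pos hg]
        have hM : (([(1:Int)] ++ (pvBounds (y :: t) gm).map (fun c => c + 1)) ++ [((x :: y :: t).length : Int)])
            = ((0 : Int) :: (pvBounds (y :: t) gm ++ [((y :: t).length : Int)])).map (fun c => c + 1) := by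
          simp [List.map_append]
        rw [hM]
        rw [show ((0 : Int) :: (pvBounds (y :: t) gm ++ [((y :: t).length : Int)])).map (fun c => c + 1)
            = (1 : Int) :: (pvBounds (y :: t) gm ++ [((y :: t).length : Int)]).map (fun c => c + 1) from by
          norm_num]
        rw [List.zip_cons_cons]
        rw [show (1 : Int) :: (pvBounds (y :: t) gm ++ [((y :: t).length : Int)]).map (fun c => c + 1)
            = ((0 : Int) :: (pvBounds (y :: t) gm ++ [((y :: t).length : Int)])).map (fun c => c + 1) from by
          norm_num]
        rw [pvZipMap]
        simp only [List.map_cons, List.map_map]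
        rw [show PySem.List.slice (x :: y :: t) (some (0 : Int)) (some (1 : Int)) = [x] from by
          rw [PySem.List.slice_toNat _ le_rfl (by omega)]
          simp]
        rw [List.map_congr_left (g := fun p : Int × Int =>
            PySem.List.slice (y :: t) (some p.1) (some p.2)) ?_]
        · rw [hIH]
          rw [show pvSplit gm (x :: y :: t) = [x] :: pvSplit gm (y :: t) from by
            simp [pvSplit, hg]]
        · rintro ⟨u, v⟩ hp
          obtain ⟨h1, h2⟩ := List.of_mem_zip hp
          have hu : 0 ≤ u := by
            rcases List.mem_cons.mp h1 with h | h
            · omega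
            · exact hEpos u h
          have hv2 : 0 ≤ v := hEpos v h2
          simp only [Function.comp]
          exact pvSlice_succ_succ x (y :: t) u v hu hv2
      · rw [if_neg hg, List.nil_append]
        obtain ⟨c0, E', hE⟩ := List.exists_cons_of_ne_nil
          (show pvBounds (y :: t) gm ++ [((y :: t).length : Int)] ≠ [] from by simp)
        have hc0 : 0 ≤ c0 := hEpos c0 (by rw [hE]; simp)
        have hE'pos : ∀ v ∈ E', 0 ≤ v := fun v hv => hEpos v (by rw [hE]; simp [hv])
        have hM : ((pvBounds (y :: t) gm).map (fun c => c + 1) ++ [((x :: y :: t).length : Int)])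
            = ((pvBounds (y :: t) gm ++ [((y :: t).length : Int)]).map (fun c => c + 1)) := by
          simp [List.map_append]
        rw [hM, hE]
        rw [show ((c0 :: E').map (fun c : Int => c + 1)) = (c0 + 1) :: E'.map (fun c => c + 1) from by
          simp]
        rw [List.zip_cons_cons]
        rw [show (c0 + 1) :: E'.map (fun c : Int => c + 1) = (c0 :: E').map (fun c => c + 1) from by
          simp]
        rw [pvZipMap]
        simp only [List.map_cons, List.map_map]
        rw [pvSlice_zero_succ x (y :: t) c0 hc0]
        rw [List.map_congr_left (g := fun p : Int × Int =>
            PySem.List.slice (y :: t) (some p.1) (some p.2)) ?_]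
        · rw [hE, List.zip_cons_cons] at hIH
          simp only [List.map_cons] at hIH
          rw [hs, List.cons.injEq] at hIH
          obtain ⟨hIH1, hIH2⟩ := hIH
          rw [hIH1, hIH2]
          rw [show pvSplit gm (x :: y :: t)
              = (x :: (pvSplit gm (y :: t)).headI) :: (pvSplit gm (y :: t)).tail from by
            simp [pvSplit, hg]]
          rw [hs]
          simp
        · rintro ⟨u, v⟩ hp
          obtain ⟨h1, h2⟩ := List.of_mem_zip hp
          have hu : 0 ≤ u := by
            rcases List.mem_cons.mp h1 with h | h
            · omega
            · exact hE'pos u h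
          have hv2 : 0 ≤ v := hE'pos v h2
          simp only [Function.comp]
          exact pvSlice_succ_succ x (y :: t) u v hu hv2

theorem pvFilterA_spec (lm : Int) : ∀ (l : List (List (List Int))) (cf : Int),
    pvFilterA lm l cf
      = (l.filter (fun s => decide (lm ≤ (s.length : Int))),
         cf + ((l.length : Int) - (((l.filter (fun s => decide (lm ≤ (s.length : Int)))).length : Int)))) := by
  intro l
  induction l with
  | nil => intro cf; simp [pvFilterA]
  | cons s rest ih =>
    intro cf
    simp only [pvFilterA]
    by_cases h : (s.length : Int) < lm
    · rw [if_pos h, ih]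
      have hf : decide (lm ≤ (s.length : Int)) = false := by simp; omega
      have hle := List.length_filter_le (fun s => decide (lm ≤ (s.length : Int))) rest
      simp only [List.filter_cons, hf, Bool.false_eq_true, ite_false, List.length_cons]
      simp only [Prod.mk.injEq]
      refine ⟨trivial, ?_⟩
      push_cast
      omega
    · rw [if_neg h]
      simp only [ih]
      have hf : decide (lm ≤ (s.length : Int)) = true := by simp; omega
      simp only [List.filter_cons, hf, ite_true, List.length_cons]
      simp only [Prod.mk.injEq]
      refine ⟨trivial, ?_⟩
      push_cast
      ring

theorem track_splitting_filtered_spec : Claim_equal_track_splitting_filtered := by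
  unfold Claim_equal_track_splitting_filtered
  intro track gm lm hdom hpre
  obtain ⟨hne, -⟩ := hpre
  unfold Spec_track_splitting_filtered
  obtain ⟨a, l, hs⟩ := List.exists_cons_of_ne_nil (pvSplit_ne_nil gm track hne)
  have hA := pvFoldA_spec gm track hne [] 0 []
  rw [hs] at hA
  have hA1 := congrArg Prod.fst hA
  have hA2 := congrArg Prod.snd hA
  simp only [List.nil_append, List.headI, List.tail_cons] at hA1 hA2
  have hseg : pvSegs track gm = a :: l := by rw [pvSegs_eq gm track hne, hs]
  have hlenseg : (pvSegs track gm).length = (pvBounds track gm).length + 1 := by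
    unfold pvSegs pvCuts
    simp [List.length_zip]
  rw [hseg] at hlenseg
  simp only [track_splitting_filtered, track_splitting_filtered_alt]
  rw [pvFilterA_spec lm]
  rw [hA1, hseg]
  simp only [Prod.mk.injEq]
  refine ⟨trivial, ?_, ?_⟩
  · rw [hA2]
    simp only [List.length_cons] at hlenseg ⊢
    omega
  · ring
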